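-- pv_equiv track=rewrite | github.com/HAAIL-Universe/AgentZero | A2/work/V211_causal_inference/causal_inference.py | _reachable_undirected
-- ===== SOURCE A (Python) =====
-- def _reachable_undirected(start: str, removed: set[str],
--                            graph_parents: dict[str, list[str]],
--                            graph_children: dict[str, list[str]]) -> set[str]:
--     """Nodes reachable from start via undirected edges, ignoring removed nodes."""
--     visited = set()
--     stack = [start]
--     while stack:
--         node = stack.pop()
--         if node in visited or node in removed:
--             continue
--         visited.add(node)
--         for p in graph_parents.get(node, []):
--             if p not in visited and p not in removed:
--                 stack.append(p)
--         for c in graph_children.get(node, []):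
--             if c not in visited and c not in removed:
--                 stack.append(c)
--     return visited
-- ===== SOURCE B (Python) =====
-- def _reachable_undirected(start: str, removed: set[str],
--                            graph_parents: dict[str, list[str]],
--                            graph_children: dict[str, list[str]]) -> set[str]:
--     """Nodes reachable from start via undirected edges, ignoring removed nodes.
--
--     Computed as a least fixpoint by chaotic iteration (Bellman-Ford style):
--     repeatedly sweep the static key list of both adjacency maps, marking the
--     neighbours of every already-marked key, until one full sweep changes
--     nothing.  No stack, queue or frontier is maintained."""
--     if start in removed:
--         return set()
--     keys = list(dict.fromkeys(list(graph_parents) + list(graph_children)))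
--     visited = {start}
--     changed = True
--     while changed:
--         changed = False
--         for n in keys:
--             if n in visited:
--                 for m in graph_parents.get(n, []) + graph_children.get(n, []):
--                     if m not in visited and m not in removed:
--                         visited.add(m)
--                         changed = True
--     return visited
-- ===== Notes on version B (the rewrite author's own statement) =====
-- stated objective: alternative
-- what changed: Replaced the worklist (stack) DFS by a chaotic-iteration least-fixpoint computation: B keeps no stack/queue/frontier at all, it repeatedly sweeps the static key list of both adjacency maps, marking the neighbours of already-marked keys, until one full sweep changes nothing; the resulting set of reachable nodes is identical.
import Mathlib
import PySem

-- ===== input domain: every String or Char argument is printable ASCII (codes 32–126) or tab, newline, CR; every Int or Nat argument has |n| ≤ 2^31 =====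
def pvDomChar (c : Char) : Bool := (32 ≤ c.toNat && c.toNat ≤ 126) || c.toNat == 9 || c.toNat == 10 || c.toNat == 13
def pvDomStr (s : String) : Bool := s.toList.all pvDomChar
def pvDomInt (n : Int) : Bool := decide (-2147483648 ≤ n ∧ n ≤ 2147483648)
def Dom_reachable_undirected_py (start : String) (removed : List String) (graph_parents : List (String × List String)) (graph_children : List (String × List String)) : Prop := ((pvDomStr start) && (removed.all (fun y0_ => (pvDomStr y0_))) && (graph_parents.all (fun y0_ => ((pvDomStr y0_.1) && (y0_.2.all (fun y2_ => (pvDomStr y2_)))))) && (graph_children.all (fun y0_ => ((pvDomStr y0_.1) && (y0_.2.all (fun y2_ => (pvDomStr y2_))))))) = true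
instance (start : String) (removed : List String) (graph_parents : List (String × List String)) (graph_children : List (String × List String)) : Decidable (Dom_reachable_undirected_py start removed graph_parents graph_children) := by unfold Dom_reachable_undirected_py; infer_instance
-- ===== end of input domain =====

-- B replaces A's worklist (stack) DFS by a chaotic-iteration least-fixpoint computation: no
-- stack/queue/frontier, just repeated full sweeps over the static key list until nothing changes
-- (objective: alternative algorithm, same reachable set).
-- Python returns a set (its iteration order is not modelled); both ports return the canonical
-- sorted list of the set's elements, so the ports are compared on the set value itself.

-- Totality guard for A's loop: fuel = 1 + #candidate nodes + total adjacency length,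
-- a strict upper bound on the number of loop iterations (proved below).
def pvNodesU (start : String) (graph_parents : List (String × List String)) (graph_children : List (String × List String)) : List String :=
  PySem.List.dedup (start :: (graph_parents.flatMap (fun kv => kv.2) ++ graph_children.flatMap (fun kv => kv.2)))

def pvDeg (graph_parents : List (String × List String)) (graph_children : List (String × List String)) (n : String) : Nat :=
  (PySem.Dict.getD ⟨graph_parents⟩ n []).length + (PySem.Dict.getD ⟨graph_children⟩ n []).length

def pvFuel (start : String) (graph_parents : List (String × List String)) (graph_children : List (String × List String)) : Nat :=
  1 + (pvNodesU start graph_parents graph_children).length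
    + ((pvNodesU start graph_parents graph_children).map (pvDeg graph_parents graph_children)).sum

-- ===== PORT A =====
-- while stack: pop; skip visited/removed; mark; push unvisited, unremoved parents then children
-- (stack top = list head; pushing via cons reproduces Python's append/pop-from-the-end order).
def pvLoopA (removed : List String) (graph_parents : List (String × List String)) (graph_children : List (String × List String)) : Nat → List String → PySem.Set String → PySem.Set String
  | 0, _, visited => visited
  | _ + 1, [], visited => visited
  | fuel + 1, node :: rest, visited =>
    if visited.contains node || removed.contains node then
      pvLoopA removed graph_parents graph_children fuel rest visited
    else
      let visited' := PySem.Set.add visited node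
      let st1 := (PySem.Dict.getD ⟨graph_parents⟩ node []).foldl
        (fun st p => if !(visited'.contains p) && !(removed.contains p) then p :: st else st) rest
      let st2 := (PySem.Dict.getD ⟨graph_children⟩ node []).foldl
        (fun st c => if !(visited'.contains c) && !(removed.contains c) then c :: st else st) st1
      pvLoopA removed graph_parents graph_children fuel st2 visited'

def reachable_undirected_py (start : String) (removed : List String) (graph_parents : List (String × List String)) (graph_children : List (String × List String)) : List String :=
  PySem.List.sorted
    (pvLoopA removed graph_parents graph_children (pvFuel start graph_parents graph_children) [start] PySem.Set.empty)
    (fun x => x)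

-- ===== PORT B =====
-- keys = list(dict.fromkeys(list(graph_parents) + list(graph_children)))
def pvKeys (graph_parents : List (String × List String)) (graph_children : List (String × List String)) : List String :=
  PySem.List.dedup (graph_parents.map Prod.fst ++ graph_children.map Prod.fst)

-- inner mark: if m not in visited and m not in removed: visited.add(m); changed = True
def pvMark (removed : List String) (acc : PySem.Set String × Bool) (m : String) : PySem.Set String × Bool :=
  if !(acc.1.contains m) && !(removed.contains m) then (PySem.Set.add acc.1 m, true) else acc

-- one key of the sweep: if n in visited: mark every m in parents.get(n,[]) + children.get(n,[])
def pvSweepN (removed : List String) (graph_parents : List (String × List String)) (graph_children : List (String × List String)) (acc : PySem.Set String × Bool) (n : String) : PySem.Set String × Bool :=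
  if acc.1.contains n then
    (PySem.Dict.getD ⟨graph_parents⟩ n [] ++ PySem.Dict.getD ⟨graph_children⟩ n []).foldl (pvMark removed) acc
  else acc

-- while changed: changed = False; full sweep of the key list.  The fuel is only a totality
-- guard: #candidates+1 sweeps always reach the fixpoint (proved below).
def pvLoopB (keys removed : List String) (graph_parents : List (String × List String)) (graph_children : List (String × List String)) : Nat → PySem.Set String → PySem.Set String
  | 0, visited => visited
  | fuel + 1, visited =>
    let s := keys.foldl (pvSweepN removed graph_parents graph_children) (visited, false)
    if s.2 then pvLoopB keys removed graph_parents graph_children fuel s.1 else s.1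

def reachable_undirected_py_alt (start : String) (removed : List String) (graph_parents : List (String × List String)) (graph_children : List (String × List String)) : List String :=
  if removed.contains start then []
  else
    PySem.List.sorted
      (pvLoopB (pvKeys graph_parents graph_children) removed graph_parents graph_children
        ((pvNodesU start graph_parents graph_children).length + 1)
        (PySem.Set.add PySem.Set.empty start))
      (fun x => x)

-- ===== PRECONDITION & SPEC =====
def Spec_reachable_undirected_py (start : String) (removed : List String) (graph_parents : List (String × List String)) (graph_children : List (String × List String)) (out : List String) : Prop := out = reachable_undirected_py_alt start removed graph_parents graph_children
instance (start : String) (removed : List String) (graph_parents : List (String × List String)) (graph_children : List (String × List String)) (out : List String) : Decidable (Spec_reachable_undirected_py start removed graph_parents graph_children out) := by unfold Spec_reachable_undirected_py; infer_instance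

-- ===== CLAIM (what is proved, stated in full; the proofs are below) =====
def Claim_equal_reachable_undirected_py : Prop := ∀ (start : String) (removed : List String) (graph_parents : List (String × List String)) (graph_children : List (String × List String)), Dom_reachable_undirected_py start removed graph_parents graph_children → Spec_reachable_undirected_py start removed graph_parents graph_children (reachable_undirected_py start removed graph_parents graph_children)

-- ===== LEMMAS AND PROOFS =====

-- undirected neighbours of a node (parents then children, first-match dict lookup)
def pvNbrs (graph_parents : List (String × List String)) (graph_children : List (String × List String)) (n : String) : List String :=
  PySem.Dict.getD ⟨graph_parents⟩ n [] ++ PySem.Dict.getD ⟨graph_children⟩ n []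

-- the set both programs compute: nodes reachable from start avoiding removed
inductive pvReach (start : String) (removed : List String) (graph_parents : List (String × List String)) (graph_children : List (String × List String)) : String → Prop
  | base : removed.contains start = false → pvReach start removed graph_parents graph_children start
  | step {n m : String} : pvReach start removed graph_parents graph_children n →
      m ∈ pvNbrs graph_parents graph_children n → removed.contains m = false →
      pvReach start removed graph_parents graph_children m

def pvSumNotIn (l : List String) (g : String → Nat) (v : List String) : Nat :=
  ((l.filter (fun m => !(v.contains m))).map g).sum

def pvPhiA (start : String) (graph_parents : List (String × List String)) (graph_children : List (String × List String)) (st : List String) (v : List String) : Nat :=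
  st.length + pvSumNotIn (pvNodesU start graph_parents graph_children) (pvDeg graph_parents graph_children) v

theorem pv_getD_sub_flatMap (l : List (String × List String)) (n x : String)
    (h : x ∈ PySem.Dict.getD ⟨l⟩ n []) : x ∈ l.flatMap (fun kv => kv.2) := by
  unfold PySem.Dict.getD PySem.Dict.get? at h
  rcases hf : List.find? (fun p => p.1 == n) (PySem.Dict.mk l).items with _ | p
  · rw [hf] at h; simp at h
  · rw [hf] at h; simp at h
    exact List.mem_flatMap.mpr ⟨p, List.mem_of_find?_eq_some hf, h⟩

theorem pv_nbrs_sub_nodes (start : String) (graph_parents graph_children : List (String × List String)) (n x : String)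
    (h : x ∈ pvNbrs graph_parents graph_children n) : x ∈ pvNodesU start graph_parents graph_children := by
  unfold pvNbrs at h
  unfold pvNodesU
  rw [PySem.List.mem_dedup]
  rcases List.mem_append.mp h with h1 | h2
  · exact List.mem_cons_of_mem _ (List.mem_append_left _ (pv_getD_sub_flatMap _ _ _ h1))
  · exact List.mem_cons_of_mem _ (List.mem_append_right _ (pv_getD_sub_flatMap _ _ _ h2))

theorem pv_start_mem_nodes (start : String) (graph_parents graph_children : List (String × List String)) :
    start ∈ pvNodesU start graph_parents graph_children := by
  unfold pvNodesU
  rw [PySem.List.mem_dedup]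
  exact List.mem_cons_self

theorem pv_add_nodup (v : PySem.Set String) (n : String) (h : v.Nodup) : (PySem.Set.add v n).Nodup := by
  unfold PySem.Set.add
  split
  · exact h
  · rename_i hc
    have hn : n ∉ v := by
      intro hm
      simp [PySem.Set.contains, List.contains_eq_mem, hm] at hc
    simp [List.nodup_append, h]
    exact fun a ha he => hn (he ▸ ha)

theorem pv_mem_add (v : PySem.Set String) (n x : String) : x ∈ PySem.Set.add v n ↔ x ∈ v ∨ x = n :=
  PySem.Set.mem_add v n x

theorem pv_add_len (v : PySem.Set String) (n : String) (h : v.contains n = false) :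
    (PySem.Set.add v n).length = v.length + 1 := by
  have hn : n ∉ v := by simpa [List.contains_eq_mem] using h
  simp [PySem.Set.add, hn]

theorem pv_add_len_ge (v : PySem.Set String) (n : String) : v.length ≤ (PySem.Set.add v n).length := by
  unfold PySem.Set.add
  split
  · exact le_refl _
  · simp

theorem pv_sumNotIn_add (l : List String) (g : String → Nat) (v : List String) (n : String)
    (hl : l.Nodup) (hn : n ∈ l) (hv : v.contains n = false) :
    pvSumNotIn l g (PySem.Set.add v n) + g n = pvSumNotIn l g v := by
  have hnv : n ∉ v := by simpa [List.contains_eq_mem] using hv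
  have hadd : PySem.Set.add v n = v ++ [n] := by
    simp [PySem.Set.add, PySem.Set.contains, List.contains_eq_mem, hnv]
  rw [hadd]
  unfold pvSumNotIn
  induction l with
  | nil => cases hn
  | cons a l ih =>
    rcases List.nodup_cons.mp hl with ⟨hal, hl'⟩
    rcases List.mem_cons.mp hn with he | hnl
    · subst he
      have hfl : l.filter (fun m => !((v ++ [n]).contains m)) = l.filter (fun m => !(v.contains m)) := by
        apply List.filter_congr
        intro m hm
        have hmn : m ≠ n := fun e => hal (e ▸ hm)
        simp [List.contains_eq_mem, hmn]
      have h1 : ((v ++ [n]).contains n) = true := by simp [List.contains_eq_mem]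
      rw [List.filter_cons, List.filter_cons, h1, hv, hfl]
      simp only [Bool.not_true, Bool.not_false, Bool.false_eq_true, if_false, if_true,
        List.map_cons, List.sum_cons]
      omega
    · have han : a ≠ n := fun e => hal (e ▸ hnl)
      have hca : ((v ++ [n]).contains a) = v.contains a := by
        by_cases hva : a ∈ v <;> simp [List.contains_eq_mem, hva, han]
      rw [List.filter_cons, List.filter_cons, hca]
      have hrec := ih hl' hnl
      cases hva : v.contains a with
      | true =>
        simp only [Bool.not_true, Bool.false_eq_true, if_false]
        exact hrec
      | false =>
        simp only [Bool.not_false, if_true, List.map_cons, List.sum_cons]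
        omega

-- fold-cons-if (A's push loops)
theorem pv_foldl_push_superset (c : String → Bool) (L init : List String) (x : String)
    (h : x ∈ init) : x ∈ L.foldl (fun st p => if c p then p :: st else st) init := by
  induction L generalizing init with
  | nil => simpa using h
  | cons a L ih =>
    rw [List.foldl_cons]
    cases hc : c a with
    | true => exact ih (a :: init) (by simp [h])
    | false => exact ih init (by simpa [hc] using h)

theorem pv_foldl_push_mem (c : String → Bool) (L init : List String) (x : String)
    (h : x ∈ L.foldl (fun st p => if c p then p :: st else st) init) :
    x ∈ init ∨ (x ∈ L ∧ c x = true) := by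
  induction L generalizing init with
  | nil => exact Or.inl (by simpa using h)
  | cons a L ih =>
    rw [List.foldl_cons] at h
    rcases ih _ h with h1 | ⟨h2, h3⟩
    · cases hc : c a with
      | true =>
        rw [hc] at h1
        simp only [if_true] at h1
        rcases List.mem_cons.mp h1 with he | hi
        · exact Or.inr ⟨by simp [he], he ▸ hc⟩
        · exact Or.inl hi
      | false =>
        rw [hc] at h1
        simp only [Bool.false_eq_true, if_false] at h1
        exact Or.inl h1
    · exact Or.inr ⟨List.mem_cons_of_mem _ h2, h3⟩

theorem pv_foldl_push_found (c : String → Bool) (L init : List String) (x : String)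
    (hx : x ∈ L) (hc : c x = true) : x ∈ L.foldl (fun st p => if c p then p :: st else st) init := by
  induction L generalizing init with
  | nil => cases hx
  | cons a L ih =>
    rw [List.foldl_cons]
    rcases List.mem_cons.mp hx with he | hi
    · subst he
      rw [hc]
      exact pv_foldl_push_superset c L _ x (by simp)
    · exact ih _ hi

theorem pv_foldl_push_len (c : String → Bool) (L init : List String) :
    (L.foldl (fun st p => if c p then p :: st else st) init).length ≤ init.length + L.length := by
  induction L generalizing init with
  | nil => simp
  | cons a L ih =>
    rw [List.foldl_cons]
    refine le_trans (ih (if c a then a :: init else init)) ?_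
    cases hc : c a
    · simp
    · simp
      omega

-- ===== A-side loop lemmas =====
theorem pvLoopA_mono (removed : List String) (gp gc : List (String × List String)) (f : Nat)
    (st : List String) (v : PySem.Set String) (x : String) (h : x ∈ v) :
    x ∈ pvLoopA removed gp gc f st v := by
  induction f generalizing st v with
  | zero => simpa [pvLoopA] using h
  | succ f ih =>
    cases st with
    | nil => simpa [pvLoopA] using h
    | cons node rest =>
      rw [pvLoopA]
      split
      · exact ih rest v h
      · exact ih _ _ ((pv_mem_add v node x).mpr (Or.inl h))

theorem pvLoopA_nodup (removed : List String) (gp gc : List (String × List String)) (f : Nat)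
    (st : List String) (v : PySem.Set String) (h : v.Nodup) :
    (pvLoopA removed gp gc f st v).Nodup := by
  induction f generalizing st v with
  | zero => simpa [pvLoopA] using h
  | succ f ih =>
    cases st with
    | nil => simpa [pvLoopA] using h
    | cons node rest =>
      rw [pvLoopA]
      split
      · exact ih rest v h
      · exact ih _ _ (pv_add_nodup v node h)

theorem pvLoopA_sound (start : String) (removed : List String) (gp gc : List (String × List String)) (f : Nat)
    (st : List String) (v : PySem.Set String)
    (hst : ∀ y ∈ st, removed.contains y = true ∨ pvReach start removed gp gc y ∨ y ∈ v)
    (hv : ∀ y ∈ v, pvReach start removed gp gc y) :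
    ∀ x ∈ pvLoopA removed gp gc f st v, pvReach start removed gp gc x := by
  induction f generalizing st v with
  | zero =>
    intro x hx
    rw [pvLoopA] at hx
    exact hv x hx
  | succ f ih =>
    cases st with
    | nil =>
      intro x hx
      rw [pvLoopA] at hx
      exact hv x hx
    | cons node rest =>
      rw [pvLoopA]
      split
      · exact ih rest v (fun y hy => hst y (List.mem_cons_of_mem _ hy)) hv
      · rename_i hskip
        simp only [Bool.or_eq_true, not_or, Bool.not_eq_true] at hskip
        obtain ⟨hnv, hnr⟩ := hskip
        have hnode : pvReach start removed gp gc node := by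
          rcases hst node List.mem_cons_self with h1 | h2 | h3
          · rw [h1] at hnr; cases hnr
          · exact h2
          · exfalso
            simp [PySem.Set.contains, List.contains_eq_mem, h3] at hnv
        apply ih
        · intro y hy
          rcases pv_foldl_push_mem _ _ _ _ hy with hy1 | ⟨hy2, hy3⟩
          · rcases pv_foldl_push_mem _ _ _ _ hy1 with hy4 | ⟨hy5, hy6⟩
            · rcases hst y (List.mem_cons_of_mem _ hy4) with h1 | h2 | h3
              · exact Or.inl h1
              · exact Or.inr (Or.inl h2)
              · exact Or.inr (Or.inr ((pv_mem_add v node y).mpr (Or.inl h3)))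
            · simp only [Bool.and_eq_true, Bool.not_eq_true'] at hy6
              refine Or.inr (Or.inl (pvReach.step hnode ?_ hy6.2))
              exact List.mem_append_left _ hy5
          · simp only [Bool.and_eq_true, Bool.not_eq_true'] at hy3
            refine Or.inr (Or.inl (pvReach.step hnode ?_ hy3.2))
            exact List.mem_append_right _ hy2
        · intro y hy
          rcases (pv_mem_add v node y).mp hy with h1 | h2
          · exact hv y h1
          · exact h2 ▸ hnode

theorem pvLoopA_found (start : String) (removed : List String) (gp gc : List (String × List String)) (f : Nat)
    (st : List String) (v : PySem.Set String)
    (hphi : pvPhiA start gp gc st v ≤ f)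
    (hsub : ∀ y ∈ st, y ∈ pvNodesU start gp gc)
    (y : String) (hy : y ∈ st) (hyR : removed.contains y = false) :
    y ∈ pvLoopA removed gp gc f st v := by
  induction f generalizing st v with
  | zero =>
    exfalso
    unfold pvPhiA at hphi
    have : st.length = 0 := by omega
    rw [List.length_eq_zero_iff] at this
    subst this
    cases hy
  | succ f ih =>
    cases st with
    | nil => cases hy
    | cons node rest =>
      rw [pvLoopA]
      split
      · rename_i hskip
        rcases List.mem_cons.mp hy with he | hi
        · subst he
          rcases Bool.or_eq_true_iff.mp hskip with h1 | h2
          · apply pvLoopA_mono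
            simpa [PySem.Set.contains, List.contains_eq_mem] using h1
          · rw [h2] at hyR; cases hyR
        · apply ih rest v _ (fun z hz => hsub z (List.mem_cons_of_mem _ hz)) hi
          unfold pvPhiA at hphi ⊢
          simp only [List.length_cons] at hphi
          omega
      · rename_i hskip
        simp only [Bool.or_eq_true, not_or, Bool.not_eq_true] at hskip
        obtain ⟨hnv, hnr⟩ := hskip
        rcases List.mem_cons.mp hy with he | hi
        · subst he
          exact pvLoopA_mono _ _ _ _ _ _ _ ((pv_mem_add v y y).mpr (Or.inr rfl))
        · -- y ∈ rest ⊆ st2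
          apply ih
          · -- phi decreases
            unfold pvPhiA at hphi ⊢
            have hlen1 := pv_foldl_push_len
              (fun p => !((PySem.Set.add v node).contains p) && !(removed.contains p))
              (PySem.Dict.getD ⟨gp⟩ node []) rest
            have hlen2 := pv_foldl_push_len
              (fun c => !((PySem.Set.add v node).contains c) && !(removed.contains c))
              (PySem.Dict.getD ⟨gc⟩ node [])
              ((PySem.Dict.getD ⟨gp⟩ node []).foldl
                (fun st p => if !((PySem.Set.add v node).contains p) && !(removed.contains p) then p :: st else st) rest)
            have hsum := pv_sumNotIn_add (pvNodesU start gp gc) (pvDeg gp gc) v node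
              (PySem.List.nodup_dedup _) (hsub node List.mem_cons_self) hnv
            have hdeg : pvDeg gp gc node = (PySem.Dict.getD ⟨gp⟩ node []).length + (PySem.Dict.getD ⟨gc⟩ node []).length := rfl
            simp only [List.length_cons] at hphi
            omega
          · intro z hz
            rcases pv_foldl_push_mem _ _ _ _ hz with hz1 | ⟨hz2, _⟩
            · rcases pv_foldl_push_mem _ _ _ _ hz1 with hz3 | ⟨hz4, _⟩
              · exact hsub z (List.mem_cons_of_mem _ hz3)
              · exact pv_nbrs_sub_nodes start gp gc node z (List.mem_append_left _ hz4)
            · exact pv_nbrs_sub_nodes start gp gc node z (List.mem_append_right _ hz2)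
          · -- y ∈ st2
            apply pv_foldl_push_superset
            apply pv_foldl_push_superset
            exact hi

theorem pvLoopA_closure (start : String) (removed : List String) (gp gc : List (String × List String)) (f : Nat)
    (st : List String) (v : PySem.Set String)
    (hphi : pvPhiA start gp gc st v ≤ f)
    (hsub : ∀ y ∈ st, y ∈ pvNodesU start gp gc)
    (hinv : ∀ n ∈ v, ∀ m ∈ pvNbrs gp gc n, removed.contains m = false → m ∈ v ∨ m ∈ st) :
    ∀ n ∈ pvLoopA removed gp gc f st v, ∀ m ∈ pvNbrs gp gc n, removed.contains m = false →
      m ∈ pvLoopA removed gp gc f st v := by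
  induction f generalizing st v with
  | zero =>
    unfold pvPhiA at hphi
    have : st.length = 0 := by omega
    rw [List.length_eq_zero_iff] at this
    subst this
    intro n hn m hm hmR
    rw [pvLoopA] at hn ⊢
    rcases hinv n hn m hm hmR with h1 | h2
    · exact h1
    · cases h2
  | succ f ih =>
    cases st with
    | nil =>
      intro n hn m hm hmR
      rw [pvLoopA] at hn ⊢
      rcases hinv n hn m hm hmR with h1 | h2
      · exact h1
      · cases h2
    | cons node rest =>
      rw [pvLoopA]
      split
      · rename_i hskip
        apply ih
        · unfold pvPhiA at hphi ⊢
          simp only [List.length_cons] at hphi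
          omega
        · exact fun z hz => hsub z (List.mem_cons_of_mem _ hz)
        · intro n hn m hm hmR
          rcases hinv n hn m hm hmR with h1 | h2
          · exact Or.inl h1
          · rcases List.mem_cons.mp h2 with he | hi
            · subst he
              rcases Bool.or_eq_true_iff.mp hskip with hh1 | hh2
              · exact Or.inl (by simpa [PySem.Set.contains, List.contains_eq_mem] using hh1)
              · rw [hh2] at hmR; cases hmR
            · exact Or.inr hi
      · rename_i hskip
        simp only [Bool.or_eq_true, not_or, Bool.not_eq_true] at hskip
        obtain ⟨hnv, hnr⟩ := hskip
        apply ih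
        · unfold pvPhiA at hphi ⊢
          have hlen1 := pv_foldl_push_len
            (fun p => !((PySem.Set.add v node).contains p) && !(removed.contains p))
            (PySem.Dict.getD ⟨gp⟩ node []) rest
          have hlen2 := pv_foldl_push_len
            (fun c => !((PySem.Set.add v node).contains c) && !(removed.contains c))
            (PySem.Dict.getD ⟨gc⟩ node [])
            ((PySem.Dict.getD ⟨gp⟩ node []).foldl
              (fun st p => if !((PySem.Set.add v node).contains p) && !(removed.contains p) then p :: st else st) rest)
          have hsum := pv_sumNotIn_add (pvNodesU start gp gc) (pvDeg gp gc) v node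
            (PySem.List.nodup_dedup _) (hsub node List.mem_cons_self) hnv
          have hdeg : pvDeg gp gc node = (PySem.Dict.getD ⟨gp⟩ node []).length + (PySem.Dict.getD ⟨gc⟩ node []).length := rfl
          simp only [List.length_cons] at hphi
          omega
        · intro z hz
          rcases pv_foldl_push_mem _ _ _ _ hz with hz1 | ⟨hz2, _⟩
          · rcases pv_foldl_push_mem _ _ _ _ hz1 with hz3 | ⟨hz4, _⟩
            · exact hsub z (List.mem_cons_of_mem _ hz3)
            · exact pv_nbrs_sub_nodes start gp gc node z (List.mem_append_left _ hz4)
          · exact pv_nbrs_sub_nodes start gp gc node z (List.mem_append_right _ hz2)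
        · intro n hn m hm hmR
          rcases (pv_mem_add v node n).mp hn with h1 | h2
          · rcases hinv n h1 m hm hmR with hh1 | hh2
            · exact Or.inl ((pv_mem_add v node m).mpr (Or.inl hh1))
            · rcases List.mem_cons.mp hh2 with he | hi
              · exact Or.inl ((pv_mem_add v node m).mpr (Or.inr he))
              · refine Or.inr ?_
                apply pv_foldl_push_superset
                apply pv_foldl_push_superset
                exact hi
          · subst h2
            by_cases hmv : m ∈ PySem.Set.add v n
            · exact Or.inl hmv
            · refine Or.inr ?_
              have hmR' : m ∉ removed := by simpa [List.contains_eq_mem] using hmR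
              have hcond : (!((PySem.Set.add v n).contains m) && !(removed.contains m)) = true := by
                simp [PySem.Set.contains, List.contains_eq_mem, hmv, hmR']
              rcases List.mem_append.mp hm with hmp | hmc
              · apply pv_foldl_push_superset
                exact pv_foldl_push_found _ _ _ _ hmp hcond
              · exact pv_foldl_push_found _ _ _ _ hmc hcond

theorem pv_phi_init (start : String) (gp gc : List (String × List String)) :
    pvPhiA start gp gc [start] [] ≤ pvFuel start gp gc := by
  unfold pvPhiA pvFuel pvSumNotIn
  simp

theorem pvA_mem_iff (start : String) (removed : List String) (gp gc : List (String × List String)) (x : String) :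
    x ∈ pvLoopA removed gp gc (pvFuel start gp gc) [start] PySem.Set.empty ↔
      pvReach start removed gp gc x := by
  constructor
  · intro hx
    refine pvLoopA_sound start removed gp gc _ [start] PySem.Set.empty ?_ ?_ x hx
    · intro y hy
      rcases List.mem_cons.mp hy with he | hi
      · subst he
        cases hR : removed.contains y with
        | true => exact Or.inl rfl
        | false => exact Or.inr (Or.inl (pvReach.base hR))
      · cases hi
    · intro y hy
      cases hy
  · intro hx
    induction hx with
    | base hR =>
      refine pvLoopA_found start removed gp gc _ [start] PySem.Set.empty (pv_phi_init start gp gc) ?_ start List.mem_cons_self hR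
      intro z hz
      rcases List.mem_cons.mp hz with he | hi
      · exact he ▸ pv_start_mem_nodes start gp gc
      · cases hi
    | step hn hm hR ihn =>
      refine pvLoopA_closure start removed gp gc _ [start] PySem.Set.empty (pv_phi_init start gp gc) ?_ ?_ _ ihn _ hm hR
      · intro z hz
        rcases List.mem_cons.mp hz with he | hi
        · exact he ▸ pv_start_mem_nodes start gp gc
        · cases hi
      · intro n hn m hm hmR
        cases hn

-- ===== B-side: inner mark-fold lemmas =====
theorem pvMark_fold_mono (removed : List String) (L : List String) (acc : PySem.Set String × Bool)
    (x : String) (h : x ∈ acc.1) : x ∈ (L.foldl (pvMark removed) acc).1 := by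
  induction L generalizing acc with
  | nil => simpa using h
  | cons a L ih =>
    rw [List.foldl_cons]
    apply ih
    unfold pvMark
    split
    · exact (pv_mem_add _ _ _).mpr (Or.inl h)
    · exact h

theorem pvMark_fold_src (removed : List String) (L : List String) (acc : PySem.Set String × Bool)
    (x : String) (h : x ∈ (L.foldl (pvMark removed) acc).1) :
    x ∈ acc.1 ∨ (x ∈ L ∧ removed.contains x = false) := by
  induction L generalizing acc with
  | nil => exact Or.inl (by simpa using h)
  | cons a L ih =>
    rw [List.foldl_cons] at h
    rcases ih _ h with h1 | ⟨h2, h3⟩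
    · unfold pvMark at h1
      by_cases hc : (!(acc.1.contains a) && !(removed.contains a)) = true
      · rw [if_pos hc] at h1
        rcases (pv_mem_add _ _ _).mp h1 with hh1 | hh2
        · exact Or.inl hh1
        · subst hh2
          simp only [Bool.and_eq_true, Bool.not_eq_true'] at hc
          exact Or.inr ⟨List.mem_cons_self, hc.2⟩
      · rw [if_neg hc] at h1
        exact Or.inl h1
    · exact Or.inr ⟨List.mem_cons_of_mem _ h2, h3⟩

theorem pvMark_fold_nodup (removed : List String) (L : List String) (acc : PySem.Set String × Bool)
    (h : acc.1.Nodup) : (L.foldl (pvMark removed) acc).1.Nodup := by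
  induction L generalizing acc with
  | nil => simpa using h
  | cons a L ih =>
    rw [List.foldl_cons]
    apply ih
    unfold pvMark
    split
    · exact pv_add_nodup _ _ h
    · exact h

theorem pvMark_fold_false (removed : List String) (L : List String) (acc : PySem.Set String × Bool)
    (h : (L.foldl (pvMark removed) acc).2 = false) : L.foldl (pvMark removed) acc = acc ∧ acc.2 = false := by
  induction L generalizing acc with
  | nil => exact ⟨rfl, by simpa using h⟩
  | cons a L ih =>
    rw [List.foldl_cons] at h ⊢
    obtain ⟨h1, h2⟩ := ih _ h
    have hstep : pvMark removed acc a = acc := by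
      unfold pvMark at h2 ⊢
      split at h2
      · simp at h2
      · rename_i hc; rw [if_neg hc]
    rw [hstep] at h1
    rw [hstep]
    exact ⟨h1, by rw [hstep] at h2; exact h2⟩

theorem pvMark_fold_false_closed (removed : List String) (L : List String) (acc : PySem.Set String × Bool)
    (h : (L.foldl (pvMark removed) acc).2 = false) :
    ∀ m ∈ L, m ∈ acc.1 ∨ removed.contains m = true := by
  induction L generalizing acc with
  | nil => intro m hm; cases hm
  | cons a L ih =>
    rw [List.foldl_cons] at h
    have h2 : (pvMark removed acc a).2 = false := (pvMark_fold_false removed L _ h).2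
    have hstep : pvMark removed acc a = acc := by
      unfold pvMark at h2 ⊢
      split at h2
      · simp at h2
      · rename_i hc; rw [if_neg hc]
    intro m hm
    rcases List.mem_cons.mp hm with he | hi
    · subst he
      unfold pvMark at h2
      split at h2
      · simp at h2
      · rename_i hc
        simp only [Bool.and_eq_true, Bool.not_eq_true'] at hc
        by_cases hv : m ∈ acc.1
        · exact Or.inl hv
        · right
          rcases Bool.eq_false_or_eq_true (removed.contains m) with hr | hr
          · exact hr
          · exfalso
            apply hc
            exact ⟨by simpa [PySem.Set.contains, List.contains_eq_mem] using hv, hr⟩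
    · rw [hstep] at h
      exact ih _ h m hi

theorem pvMark_fold_len_mono (removed : List String) (L : List String) (acc : PySem.Set String × Bool) :
    acc.1.length ≤ (L.foldl (pvMark removed) acc).1.length := by
  induction L generalizing acc with
  | nil => simp
  | cons a L ih =>
    rw [List.foldl_cons]
    refine le_trans ?_ (ih _)
    unfold pvMark
    split
    · exact pv_add_len_ge _ _
    · exact le_refl _

theorem pvMark_fold_growth (removed : List String) (L : List String) (acc : PySem.Set String × Bool)
    (ha : acc.2 = false) (h : (L.foldl (pvMark removed) acc).2 = true) :
    acc.1.length < (L.foldl (pvMark removed) acc).1.length := by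
  induction L generalizing acc with
  | nil => rw [List.foldl_nil] at h; rw [ha] at h; cases h
  | cons a L ih =>
    rw [List.foldl_cons] at h ⊢
    by_cases hc : (!(acc.1.contains a) && !(removed.contains a)) = true
    · have hstep : pvMark removed acc a = (PySem.Set.add acc.1 a, true) := by
        unfold pvMark; rw [if_pos hc]
      rw [hstep] at h ⊢
      have hlen : acc.1.length < (PySem.Set.add acc.1 a).length := by
        simp only [Bool.and_eq_true, Bool.not_eq_true'] at hc
        rw [pv_add_len _ _ hc.1]
        omega
      exact lt_of_lt_of_le hlen (pvMark_fold_len_mono removed L (PySem.Set.add acc.1 a, true))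
    · have hstep : pvMark removed acc a = acc := by
        unfold pvMark; rw [if_neg hc]
      rw [hstep] at h ⊢
      exact ih acc ha h

-- ===== B-side: sweep (fold of pvSweepN over the key list) lemmas =====
theorem pvSweepN_false (removed : List String) (gp gc : List (String × List String))
    (acc : PySem.Set String × Bool) (n : String)
    (h : (pvSweepN removed gp gc acc n).2 = false) : pvSweepN removed gp gc acc n = acc := by
  unfold pvSweepN at h ⊢
  split
  · split at h
    · exact (pvMark_fold_false _ _ _ h).1
    · rename_i hc hc'; exact absurd hc hc'
  · rfl

theorem pvSweep_false (removed : List String) (gp gc : List (String × List String))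
    (keys : List String) (acc : PySem.Set String × Bool)
    (h : (keys.foldl (pvSweepN removed gp gc) acc).2 = false) :
    keys.foldl (pvSweepN removed gp gc) acc = acc := by
  induction keys generalizing acc with
  | nil => rfl
  | cons k keys ih =>
    rw [List.foldl_cons] at h ⊢
    have h1 := ih _ h
    rw [h1] at h
    have h2 := pvSweepN_false removed gp gc acc k h
    rw [h1, h2]

theorem pvSweep_mono (removed : List String) (gp gc : List (String × List String))
    (keys : List String) (acc : PySem.Set String × Bool) (x : String) (h : x ∈ acc.1) :
    x ∈ (keys.foldl (pvSweepN removed gp gc) acc).1 := by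
  induction keys generalizing acc with
  | nil => simpa using h
  | cons k keys ih =>
    rw [List.foldl_cons]
    apply ih
    unfold pvSweepN
    split
    · exact pvMark_fold_mono _ _ _ _ h
    · exact h

theorem pvSweep_src (removed : List String) (gp gc : List (String × List String))
    (keys : List String) (acc : PySem.Set String × Bool) (x : String)
    (h : x ∈ (keys.foldl (pvSweepN removed gp gc) acc).1) :
    x ∈ acc.1 ∨ ((∃ n, x ∈ pvNbrs gp gc n) ∧ removed.contains x = false) := by
  induction keys generalizing acc with
  | nil => exact Or.inl (by simpa using h)
  | cons k keys ih =>
    rw [List.foldl_cons] at h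
    rcases ih _ h with h1 | h2
    · unfold pvSweepN at h1
      split at h1
      · rcases pvMark_fold_src _ _ _ _ h1 with hh1 | ⟨hh2, hh3⟩
        · exact Or.inl hh1
        · exact Or.inr ⟨⟨k, hh2⟩, hh3⟩
      · exact Or.inl h1
    · exact Or.inr h2

-- a node marked reachable only ever gets neighbours of marked nodes added: soundness
theorem pvSweep_sound (start : String) (removed : List String) (gp gc : List (String × List String))
    (keys : List String) (acc : PySem.Set String × Bool)
    (hv : ∀ y ∈ acc.1, pvReach start removed gp gc y) :
    ∀ x ∈ (keys.foldl (pvSweepN removed gp gc) acc).1, pvReach start removed gp gc x := by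
  induction keys generalizing acc with
  | nil => simpa using hv
  | cons k keys ih =>
    rw [List.foldl_cons]
    apply ih
    intro y hy
    unfold pvSweepN at hy
    split at hy
    · rename_i hk
      have hkr : pvReach start removed gp gc k :=
        hv k (by simpa [PySem.Set.contains, List.contains_eq_mem] using hk)
      rcases pvMark_fold_src _ _ _ _ hy with h1 | ⟨h2, h3⟩
      · exact hv y h1
      · exact pvReach.step hkr h2 h3
    · exact hv y hy

theorem pvSweep_nodup (removed : List String) (gp gc : List (String × List String))
    (keys : List String) (acc : PySem.Set String × Bool) (h : acc.1.Nodup) :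
    (keys.foldl (pvSweepN removed gp gc) acc).1.Nodup := by
  induction keys generalizing acc with
  | nil => simpa using h
  | cons k keys ih =>
    rw [List.foldl_cons]
    apply ih
    unfold pvSweepN
    split
    · exact pvMark_fold_nodup _ _ _ h
    · exact h

theorem pvSweep_len_mono (removed : List String) (gp gc : List (String × List String))
    (keys : List String) (acc : PySem.Set String × Bool) :
    acc.1.length ≤ (keys.foldl (pvSweepN removed gp gc) acc).1.length := by
  induction keys generalizing acc with
  | nil => simp
  | cons k keys ih =>
    rw [List.foldl_cons]
    refine le_trans ?_ (ih _)
    unfold pvSweepN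
    split
    · exact pvMark_fold_len_mono _ _ _
    · exact le_refl _

theorem pvSweep_growth (removed : List String) (gp gc : List (String × List String))
    (keys : List String) (acc : PySem.Set String × Bool)
    (ha : acc.2 = false) (h : (keys.foldl (pvSweepN removed gp gc) acc).2 = true) :
    acc.1.length < (keys.foldl (pvSweepN removed gp gc) acc).1.length := by
  induction keys generalizing acc with
  | nil => rw [List.foldl_nil] at h; rw [ha] at h; cases h
  | cons k keys ih =>
    rw [List.foldl_cons] at h ⊢
    cases hs : (pvSweepN removed gp gc acc k).2 with
    | false =>
      rw [pvSweepN_false removed gp gc acc k hs] at h ⊢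
      exact ih acc ha h
    | true =>
      have hgrow : acc.1.length < (pvSweepN removed gp gc acc k).1.length := by
        unfold pvSweepN at hs ⊢
        split at hs
        · split
          · exact pvMark_fold_growth _ _ _ ha hs
          · rename_i hc hc'; exact absurd hc hc'
        · rw [ha] at hs; cases hs
      exact lt_of_lt_of_le hgrow (pvSweep_len_mono removed gp gc keys _)

-- if a full sweep from (v, false) reports no change, v is closed under marked-key expansion
theorem pvSweep_false_closed (removed : List String) (gp gc : List (String × List String))
    (keys : List String) (v : PySem.Set String)
    (h : (keys.foldl (pvSweepN removed gp gc) (v, false)).2 = false) :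
    ∀ n ∈ keys, n ∈ v → ∀ m ∈ pvNbrs gp gc n, removed.contains m = false → m ∈ v := by
  induction keys with
  | nil => intro n hn; cases hn
  | cons k keys ih =>
    rw [List.foldl_cons] at h
    have htail := pvSweep_false removed gp gc keys _ h
    have h2 : (pvSweepN removed gp gc (v, false) k).2 = false := by
      rw [htail] at h; exact h
    have hstep := pvSweepN_false removed gp gc (v, false) k h2
    rw [hstep] at h
    intro n hn hnv m hm hmR
    rcases List.mem_cons.mp hn with he | hi
    · subst he
      have hc : ((v, false) : PySem.Set String × Bool).1.contains n = true := by
        simpa [PySem.Set.contains, List.contains_eq_mem] using hnv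
      have hflag : ((pvNbrs gp gc n).foldl (pvMark removed) ((v, false) : PySem.Set String × Bool)).2 = false := by
        have heq : pvSweepN removed gp gc (v, false) n =
            (pvNbrs gp gc n).foldl (pvMark removed) ((v, false) : PySem.Set String × Bool) := by
          unfold pvSweepN
          rw [if_pos hc]
          rfl
        rw [← heq]
        exact h2
      rcases pvMark_fold_false_closed removed (pvNbrs gp gc n) (v, false) hflag m hm with h1 | h4
      · exact h1
      · rw [h4] at hmR; cases hmR
    · exact ih h n hi hnv m hm hmR

-- a node outside the key list has no dict entry, hence no neighbours
theorem pv_getD_nil_of_not_key (l : List (String × List String)) (n : String)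
    (h : n ∉ l.map Prod.fst) : PySem.Dict.getD ⟨l⟩ n [] = [] := by
  unfold PySem.Dict.getD PySem.Dict.get?
  have hf : List.find? (fun p => p.1 == n) (PySem.Dict.mk l).items = none := by
    apply List.find?_eq_none.mpr
    intro p hp hpe
    exact h (List.mem_map.mpr ⟨p, hp, by simpa using hpe⟩)
  rw [hf]
  rfl

theorem pv_nbrs_nil_of_not_key (gp gc : List (String × List String)) (n : String)
    (h : n ∉ pvKeys gp gc) : pvNbrs gp gc n = [] := by
  unfold pvKeys at h
  rw [PySem.List.mem_dedup, List.mem_append] at h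
  push_neg at h
  unfold pvNbrs
  rw [pv_getD_nil_of_not_key gp n h.1, pv_getD_nil_of_not_key gc n h.2]
  rfl

-- ===== B-side loop lemmas =====
theorem pvLoopB_mono (keys removed : List String) (gp gc : List (String × List String)) (f : Nat)
    (v : PySem.Set String) (x : String) (h : x ∈ v) :
    x ∈ pvLoopB keys removed gp gc f v := by
  induction f generalizing v with
  | zero => simpa [pvLoopB] using h
  | succ f ih =>
    rw [pvLoopB]
    split
    · exact ih _ (pvSweep_mono _ _ _ _ _ _ h)
    · exact pvSweep_mono _ _ _ _ _ _ h

theorem pvLoopB_nodup (keys removed : List String) (gp gc : List (String × List String)) (f : Nat)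
    (v : PySem.Set String) (h : v.Nodup) :
    (pvLoopB keys removed gp gc f v).Nodup := by
  induction f generalizing v with
  | zero => simpa [pvLoopB] using h
  | succ f ih =>
    rw [pvLoopB]
    split
    · exact ih _ (pvSweep_nodup _ _ _ _ _ h)
    · exact pvSweep_nodup _ _ _ _ _ h

theorem pvLoopB_sound (start : String) (keys removed : List String) (gp gc : List (String × List String)) (f : Nat)
    (v : PySem.Set String) (hv : ∀ y ∈ v, pvReach start removed gp gc y) :
    ∀ x ∈ pvLoopB keys removed gp gc f v, pvReach start removed gp gc x := by
  induction f generalizing v with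
  | zero =>
    intro x hx
    rw [pvLoopB] at hx
    exact hv x hx
  | succ f ih =>
    rw [pvLoopB]
    split
    · exact ih _ (pvSweep_sound start removed gp gc keys (v, false) hv)
    · exact pvSweep_sound start removed gp gc keys (v, false) hv

theorem pvLoopB_closure (start : String) (removed : List String) (gp gc : List (String × List String)) (f : Nat)
    (v : PySem.Set String)
    (hnd : v.Nodup) (hsub : ∀ y ∈ v, y ∈ pvNodesU start gp gc)
    (hf : (pvNodesU start gp gc).length < f + v.length) :
    ∀ n ∈ pvLoopB (pvKeys gp gc) removed gp gc f v, ∀ m ∈ pvNbrs gp gc n, removed.contains m = false →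
      m ∈ pvLoopB (pvKeys gp gc) removed gp gc f v := by
  induction f generalizing v with
  | zero =>
    exfalso
    have hsp : v.Subperm (pvNodesU start gp gc) := List.Nodup.subperm hnd hsub
    have := hsp.length_le
    omega
  | succ f ih =>
    rw [pvLoopB]
    split
    · rename_i hch
      apply ih
      · exact pvSweep_nodup _ _ _ _ _ hnd
      · intro y hy
        rcases pvSweep_src removed gp gc _ _ y hy with h1 | ⟨⟨n, hn⟩, _⟩
        · exact hsub y h1
        · exact pv_nbrs_sub_nodes start gp gc n y hn
      · have := pvSweep_growth removed gp gc (pvKeys gp gc) (v, false) rfl hch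
        simp only at this
        omega
    · rename_i hch
      simp only [Bool.not_eq_true] at hch
      have hfix := pvSweep_false removed gp gc (pvKeys gp gc) (v, false) hch
      have h1 : ((pvKeys gp gc).foldl (pvSweepN removed gp gc) (v, false)).1 = v := by
        rw [hfix]
      rw [h1]
      intro n hn m hm hmR
      by_cases hk : n ∈ pvKeys gp gc
      · exact pvSweep_false_closed removed gp gc (pvKeys gp gc) v hch n hk hn m hm hmR
      · rw [pv_nbrs_nil_of_not_key gp gc n hk] at hm
        cases hm

theorem pvB_mem_iff (start : String) (removed : List String) (gp gc : List (String × List String))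
    (hR : removed.contains start = false) (x : String) :
    x ∈ pvLoopB (pvKeys gp gc) removed gp gc ((pvNodesU start gp gc).length + 1)
        (PySem.Set.add PySem.Set.empty start) ↔
      pvReach start removed gp gc x := by
  have hv0 : PySem.Set.add PySem.Set.empty start = [start] := rfl
  constructor
  · intro hx
    refine pvLoopB_sound start _ removed gp gc _ _ ?_ x hx
    intro y hy
    rw [hv0] at hy
    rcases List.mem_cons.mp hy with he | hi
    · subst he
      exact pvReach.base hR
    · cases hi
  · intro hx
    induction hx with
    | base hRs =>
      apply pvLoopB_mono
      rw [hv0]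
      exact List.mem_cons_self
    | step hn hm hmR ihn =>
      refine pvLoopB_closure start removed gp gc _ _ ?_ ?_ ?_ _ ihn _ hm hmR
      · rw [hv0]; simp
      · intro z hz
        rw [hv0] at hz
        rcases List.mem_cons.mp hz with he | hi
        · exact he ▸ pv_start_mem_nodes start gp gc
        · cases hi
      · rw [hv0]
        simp

theorem pvLoopA_nil (removed : List String) (gp gc : List (String × List String)) (f : Nat)
    (v : PySem.Set String) : pvLoopA removed gp gc f [] v = v := by
  cases f <;> rw [pvLoopA]

theorem pv_sorted_of_perm (xs ys : List String) (hx : xs.Nodup) (hy : ys.Nodup)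
    (hmem : ∀ a, a ∈ xs ↔ a ∈ ys) :
    PySem.List.sorted xs (fun x => x) = PySem.List.sorted ys (fun x => x) := by
  have hperm : ys.Perm xs := (List.perm_ext_iff_of_nodup hy hx).mpr (fun a => (hmem a).symm)
  have hsp : (PySem.List.sorted ys (fun x => x)).Perm xs :=
    (PySem.List.sorted_perm ys (fun x => x) false).trans hperm
  have hsnd : (PySem.List.sorted ys (fun x => x)).Nodup :=
    (PySem.List.sorted_perm ys (fun x => x) false).nodup_iff.mpr hy
  have hple : (PySem.List.sorted ys (fun x => x)).Pairwise (fun a b => a ≤ b) :=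
    PySem.List.sorted_pairwise ys (fun x => x)
  have hplt : (PySem.List.sorted ys (fun x => x)).Pairwise (fun a b => a < b) :=
    (hple.and hsnd).imp (fun h => lt_of_le_of_ne h.1 h.2)
  exact PySem.List.sorted_eq_of_perm_of_pairwise_lt xs _ (fun x => x) hsp hplt

-- ===== VERDICT (by name: the statement is the Claim_ definition above) =====
theorem reachable_undirected_py_spec : Claim_equal_reachable_undirected_py := by
  unfold Claim_equal_reachable_undirected_py
  intro start removed gp gc _hdom
  unfold Spec_reachable_undirected_py
  unfold reachable_undirected_py reachable_undirected_py_alt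
  by_cases hR : removed.contains start = true
  · rw [if_pos hR]
    have hF : pvFuel start gp gc =
        ((pvNodesU start gp gc).length + ((pvNodesU start gp gc).map (pvDeg gp gc)).sum) + 1 := by
      unfold pvFuel; omega
    rw [hF, pvLoopA]
    have hRm : start ∈ removed := by simpa [List.contains_eq_mem] using hR
    have hskip : ((PySem.Set.empty : PySem.Set String).contains start || removed.contains start) = true := by
      simp [PySem.Set.contains, List.contains_eq_mem, hRm]
    rw [if_pos hskip, pvLoopA_nil]
    rfl
  · have hR' : removed.contains start = false := by simpa using hR
    rw [if_neg (fun h => Bool.false_ne_true (hR' ▸ h))]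
    apply pv_sorted_of_perm
    · exact pvLoopA_nodup _ _ _ _ _ _ List.nodup_nil
    · exact pvLoopB_nodup _ _ _ _ _ _ (by simp)
    · intro a
      rw [pvA_mem_iff, pvB_mem_iff start removed gp gc hR']
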